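-- pv_equiv track=rewrite | github.com/kipstakkr/hackerrank-interview-preparation-kit | interview_preparation_kit/dictionaries/sherlock_and_anagrams.py | count_anagram_substring_pairs
-- ===== SOURCE A (Python) =====
-- from collections import defaultdict
--
-- def count_anagram_substring_pairs(string):  # T(n ** 3), S(n ** 2)
--     """Return the count of the number of pairs of anagram substrings from the given string."""
--     alphabets = 26
--     signature_dict_count = defaultdict(int)  # S(n ** 2)
--
--     for start in range(len(string)):  # T(n)
--         for end in range(start, len(string)):  # T(n)
--             signature = [0 for _ in range(alphabets)]  # S(26)
--             for char in string[start: end + 1]:  # T(n)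
--                 signature[ord(char) - ord('a')] += 1
--
--             signature = tuple(signature)
--             signature_dict_count[signature] += 1
--
--     num_anagram_pairs = 0
--     for count in signature_dict_count.values():  # T(n ** 2)
--         num_anagram_pairs += ((count * (count - 1)) // 2)
--
--     return num_anagram_pairs
-- ===== SOURCE B (Python) =====
-- def count_anagram_substring_pairs(string):  # T(n ** 2), S(n ** 2)
--     """Return the count of the number of pairs of anagram substrings from the given string."""
--     total = 0
--     seen = {}
--     suffix = string
--     while suffix:
--         signature = [0] * 26
--         for char in suffix:
--             signature[ord(char) - ord('a')] += 1  # extend the window by one char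
--             key = tuple(signature)
--             total += seen.get(key, 0)  # pair the new substring with every earlier anagram of it
--             seen[key] = seen.get(key, 0) + 1
--         suffix = suffix[1:]
--     return total
-- ===== Notes on version B (the rewrite author's own statement) =====
-- stated objective: faster
-- what changed: B walks over the suffixes of the string, extends the 26-letter frequency signature one character at a time instead of rebuilding it per substring, and counts anagram pairs on the fly via a running seen-count per signature (total += seen[key]), so there is no final count*(count-1)//2 pass at all.
import Mathlib
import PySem

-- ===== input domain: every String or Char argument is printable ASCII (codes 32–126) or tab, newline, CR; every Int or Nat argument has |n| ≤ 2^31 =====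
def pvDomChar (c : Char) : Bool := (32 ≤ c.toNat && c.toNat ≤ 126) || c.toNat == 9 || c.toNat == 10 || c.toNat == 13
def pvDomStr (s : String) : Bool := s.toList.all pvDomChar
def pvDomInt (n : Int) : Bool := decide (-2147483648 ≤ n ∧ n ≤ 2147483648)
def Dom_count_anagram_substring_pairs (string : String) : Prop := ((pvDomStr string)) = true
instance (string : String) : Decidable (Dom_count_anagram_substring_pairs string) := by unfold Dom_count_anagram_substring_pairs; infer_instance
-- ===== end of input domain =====

-- B walks over the suffixes of the string, extends the 26-letter frequency signature one character
-- at a time (no per-substring rebuild) and counts anagram pairs on the fly with a running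
-- seen-count per signature, so A's final count*(count-1)//2 pass disappears; same value on Pre_.

-- ===== PORT A =====
-- signature[ord(char) - ord('a')] += 1 : Python negative indices wrap; pyGetD/pySetD are exact
-- wherever the index is in range, which Pre_ guarantees (outside it Python raises IndexError).
def count_anagram_substring_pairs (string : String) : Int :=
  let cs := string.toList
  let n : Int := cs.length
  let d : PySem.Dict (List Int) Int :=
    (PySem.List.pyRange 0 n 1).foldl (init := PySem.Dict.empty) fun d start =>
      (PySem.List.pyRange start n 1).foldl (init := d) fun d e =>
        let sig : List Int :=
          (PySem.List.slice cs (some start) (some (e + 1))).foldl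
            (init := List.replicate 26 (0 : Int))
            (fun sig c =>
              PySem.List.pySetD sig ((c.toNat : Int) - 97)
                (PySem.List.pyGetD sig ((c.toNat : Int) - 97) 0 + 1))
        d.modify sig 0 (· + 1)
  d.values.foldl (fun acc count => acc + PySem.Int.floordiv (count * (count - 1)) 2) 0

-- ===== PORT B =====
-- 'while suffix: … suffix = suffix[1:]' is structural recursion on the char list; the inner 'for'
-- carries (signature, (seen, total)): total += seen.get(key, 0); seen[key] = seen.get(key, 0) + 1.
def pvBLoop (cs : List Char) (dt : PySem.Dict (List Int) Int × Int) :
    PySem.Dict (List Int) Int × Int :=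
  match cs with
  | [] => dt
  | c :: tail =>
    pvBLoop tail
      (((c :: tail).foldl (init := (List.replicate 26 (0 : Int), dt))
        (fun sd ch =>
          let sig :=
            PySem.List.pySetD sd.1 ((ch.toNat : Int) - 97)
              (PySem.List.pyGetD sd.1 ((ch.toNat : Int) - 97) 0 + 1)
          (sig, (sd.2.1.modify sig 0 (· + 1), sd.2.2 + sd.2.1.getD sig 0)))).2)

def count_anagram_substring_pairs_alt (string : String) : Int :=
  (pvBLoop string.toList (PySem.Dict.empty, 0)).2

-- ===== PRECONDITION & SPEC =====
-- Pre_ excludes exactly the strings on which Python A raises IndexError: a character with code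
-- below 71 makes the (negative, wrapping) list index fall below -26 and one with code above 122
-- makes it reach 26; with every code inside [71,122] the index is in range and A returns normally.
def Pre_count_anagram_substring_pairs (string : String) : Prop :=
  (string.toList.all (fun c => 71 ≤ c.toNat && c.toNat ≤ 122)) = true
instance (string : String) : Decidable (Pre_count_anagram_substring_pairs string) := by
  unfold Pre_count_anagram_substring_pairs; infer_instance
def pvWitness_count_anagram_substring_pairs : String := "abba"

def Spec_count_anagram_substring_pairs (string : String) (out : Int) : Prop :=
  out = count_anagram_substring_pairs_alt string
instance (string : String) (out : Int) : Decidable (Spec_count_anagram_substring_pairs string out) := by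
  unfold Spec_count_anagram_substring_pairs; infer_instance

-- ===== CLAIM (what is proved, stated in full; the proofs are below) =====
def Claim_equal_count_anagram_substring_pairs : Prop :=
  ∀ (string : String), Dom_count_anagram_substring_pairs string →
    Pre_count_anagram_substring_pairs string →
    Spec_count_anagram_substring_pairs string (count_anagram_substring_pairs string)

-- ===== LEMMAS AND PROOFS =====

-- Shared vocabulary of the proof: the signature update, the from-scratch signature of the
-- substring [start, e], the counting step of A's dict, the handshake step of B's (seen, total)
-- pair, and the Σ count*(count-1)//2 reduction of a dict.
def pvF (sig : List Int) (c : Char) : List Int :=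
  PySem.List.pySetD sig ((c.toNat : Int) - 97)
    (PySem.List.pyGetD sig ((c.toNat : Int) - 97) 0 + 1)

def pvKey (cs : List Char) (start e : Int) : List Int :=
  ((cs.drop start.toNat).take (e + 1 - start).toNat).foldl pvF (List.replicate 26 (0 : Int))

def pvM (d : PySem.Dict (List Int) Int) (k : List Int) : PySem.Dict (List Int) Int :=
  d.modify k 0 (· + 1)

def pvH (dt : PySem.Dict (List Int) Int × Int) (k : List Int) :
    PySem.Dict (List Int) Int × Int :=
  (pvM dt.1 k, dt.2 + dt.1.getD k 0)

def pvS (d : PySem.Dict (List Int) Int) : Int :=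
  (d.values.map (fun c => PySem.Int.floordiv (c * (c - 1)) 2)).sum

def pvKeys (cs : List Char) : List (List Int) :=
  (PySem.List.pyRange 0 (cs.length : Int) 1).flatMap
    (fun s => (PySem.List.pyRange s (cs.length : Int) 1).map (pvKey cs s))

theorem pv_floordiv_step (v : Int) :
    PySem.Int.floordiv ((v + 1) * v) 2 = PySem.Int.floordiv (v * (v - 1)) 2 + v := by
  obtain ⟨m, hm⟩ : Even ((v - 1) * v) := by
    have := Int.even_mul_succ_self (v - 1)
    simpa using this
  have h1 : v * (v - 1) = m + m := by rw [← hm]; ring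
  have h2 : (v + 1) * v = (m + m) + 2 * v := by rw [← h1]; ring
  rw [PySem.Int.floordiv_eq_ediv_of_pos (by norm_num),
      PySem.Int.floordiv_eq_ediv_of_pos (by norm_num), h1, h2]
  omega

-- sum over a Nodup list of a function changed at one member
theorem pv_sum_update {α : Type} [DecidableEq α] (l : List α) (hl : l.Nodup) (k : α)
    (hk : k ∈ l) (f g : α → Int) (h : ∀ x ∈ l, x ≠ k → f x = g x) :
    (l.map f).sum = (l.map g).sum + (f k - g k) := by
  induction l with
  | nil => cases hk
  | cons a l' ih =>
    rcases List.mem_cons.mp hk with rfl | hk'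
    · have hnot : k ∉ l' := (List.nodup_cons.mp hl).1
      have : l'.map f = l'.map g := by
        apply List.map_congr_left
        intro x hx
        exact h x (List.mem_cons_of_mem _ hx) (fun hxk => hnot (hxk ▸ hx))
      simp [this]; ring
    · have ha : f a = g a := by
        apply h a (List.mem_cons_self)
        intro rfl'; exact (List.nodup_cons.mp hl).1 (rfl' ▸ hk')
      have := ih (List.nodup_cons.mp hl).2 hk' (fun x hx => h x (List.mem_cons_of_mem _ hx))
      simp only [List.map_cons, List.sum_cons, this, ha]; ring

theorem pv_nodup_pvM (d : PySem.Dict (List Int) Int) (k : List Int) (hd : d.keys.Nodup) :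
    (pvM d k).keys.Nodup := by
  unfold pvM
  rw [PySem.Dict.keys_modify]
  by_cases hc : d.contains k = true
  · rw [PySem.Dict.keys_insert_of_contains _ _ hc]; exact hd
  · rw [PySem.Dict.keys_insert_of_not_contains _ _ (by simpa using hc)]
    refine List.nodup_append.mpr ⟨hd, List.nodup_singleton _, ?_⟩
    intro x hx y hy hxy
    have hxk : x = k := by
      have : y = k := by simpa using hy
      rw [hxy, this]
    exact hc ((PySem.Dict.contains_iff_mem_keys _ _).mpr (hxk ▸ hx))

-- one counting step raises Σ count*(count-1)//2 by the previous count of the key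
theorem pv_S_step (d : PySem.Dict (List Int) Int) (k : List Int) (hd : d.keys.Nodup) :
    pvS (pvM d k) = pvS d + d.getD k 0 := by
  have hd' := pv_nodup_pvM d k hd
  unfold pvS
  rw [PySem.Dict.values_eq_map_keys _ hd' 0, PySem.Dict.values_eq_map_keys d hd 0,
      List.map_map, List.map_map]
  by_cases hc : d.contains k = true
  · have hkeys : (pvM d k).keys = d.keys := by
      unfold pvM; rw [PySem.Dict.keys_modify, PySem.Dict.keys_insert_of_contains _ _ hc]
    have hkmem : k ∈ d.keys := (PySem.Dict.contains_iff_mem_keys _ _).mp hc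
    rw [hkeys]
    have := pv_sum_update d.keys hd k hkmem
      (fun k' => PySem.Int.floordiv ((pvM d k).getD k' 0 * ((pvM d k).getD k' 0 - 1)) 2)
      (fun k' => PySem.Int.floordiv (d.getD k' 0 * (d.getD k' 0 - 1)) 2)
      (by
        intro x hx hxk
        have : (pvM d k).getD x 0 = d.getD x 0 := by
          unfold pvM; rw [PySem.Dict.getD_modify]; simp [hxk]
        simp only [this])
    simp only [Function.comp_def] at this ⊢
    rw [this]
    have hk1 : (pvM d k).getD k 0 = d.getD k 0 + 1 := by
      unfold pvM; rw [PySem.Dict.getD_modify]; simp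
    rw [hk1]
    have := pv_floordiv_step (d.getD k 0)
    have harg : (d.getD k 0 + 1) * (d.getD k 0 + 1 - 1) = (d.getD k 0 + 1) * d.getD k 0 := by ring
    rw [harg, this]; ring
  · have hkeys : (pvM d k).keys = d.keys ++ [k] := by
      unfold pvM
      rw [PySem.Dict.keys_modify, PySem.Dict.keys_insert_of_not_contains _ _ (by simpa using hc)]
    have hknot : k ∉ d.keys := fun hm => hc ((PySem.Dict.contains_iff_mem_keys _ _).mpr hm)
    have hgd : d.getD k 0 = 0 := PySem.Dict.getD_of_not_contains d 0 (by simpa using hc)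
    rw [hkeys, List.map_append, List.sum_append]
    have hsame :
        d.keys.map ((fun k' => PySem.Int.floordiv ((pvM d k).getD k' 0 * ((pvM d k).getD k' 0 - 1)) 2))
          = d.keys.map ((fun k' => PySem.Int.floordiv (d.getD k' 0 * (d.getD k' 0 - 1)) 2)) := by
      apply List.map_congr_left
      intro x hx
      have hxk : x ≠ k := fun h => hknot (h ▸ hx)
      have : (pvM d k).getD x 0 = d.getD x 0 := by
        unfold pvM; rw [PySem.Dict.getD_modify]; simp [hxk]
      simp only [this]
    simp only [Function.comp_def] at hsame ⊢
    rw [hsame]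
    have hk1 : (pvM d k).getD k 0 = 1 := by
      unfold pvM; rw [PySem.Dict.getD_modify]; simp [hgd]
    simp [hk1, hgd]

-- handshake counting over a key sequence equals Σ count*(count-1)//2 of the final counter
theorem pv_handshake (ks : List (List Int)) :
    ∀ (d : PySem.Dict (List Int) Int) (t : Int), d.keys.Nodup →
      (ks.foldl pvH (d, t)).2 + pvS d = t + pvS (ks.foldl pvM d) := by
  induction ks with
  | nil => intro d t _; simp
  | cons k ks' ih =>
    intro d t hd
    simp only [List.foldl_cons]
    have hstep : pvH (d, t) k = (pvM d k, t + d.getD k 0) := rfl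
    rw [hstep]
    have h1 := ih (pvM d k) (t + d.getD k 0) (pv_nodup_pvM d k hd)
    have h2 := pv_S_step d k hd
    omega

-- B's paired inner fold (incremental signature, accumulator) over a suffix equals a range-fold
-- whose key at position e is the signature rebuilt from scratch up to e (generic in the
-- accumulator δ, so it serves both the dict-only and the (dict, total) shapes).
theorem pv_inner_aux {α σ δ : Type} (f : σ → α → σ) (g : δ → σ → δ) (sig0 : σ) (a : Int)
    (l : List α) :
    ∀ (u p : List α) (d : δ), l = p ++ u →
      (u.foldl (fun sd c => (f sd.1 c, g sd.2 (f sd.1 c))) (p.foldl f sig0, d)).2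
        = (PySem.List.pyRange (a + p.length) (a + l.length) 1).foldl
            (fun d e => g d ((l.take (e + 1 - a).toNat).foldl f sig0)) d := by
  intro u
  induction u with
  | nil =>
    intro p d hl
    subst hl
    simp [PySem.List.pyRange_one_eq_nil (le_refl _)]
  | cons c u' ih =>
    intro p d hl
    have hlen : (p.length : Int) < (l.length : Int) := by
      subst hl; simp
    rw [PySem.List.pyRange_one_cons (by omega)]
    simp only [List.foldl_cons]
    have htake : l.take (a + ↑p.length + 1 - a).toNat = p ++ [c] := by
      have h1 : (a + ↑p.length + 1 - a).toNat = p.length + 1 := by omega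
      rw [h1, hl, List.take_append]
      simp
    rw [htake]
    have hfold : (p ++ [c]).foldl f sig0 = f (p.foldl f sig0) c := by
      simp
    rw [hfold]
    have := ih (p ++ [c]) (g d (f (p.foldl f sig0) c)) (by simp [hl])
    rw [hfold] at this
    have harg : (a + ((p ++ [c]).length : Int)) = a + ↑p.length + 1 := by
      simp only [List.length_append, List.length_cons, List.length_nil]
      push_cast; ring
    rw [harg] at this
    exact this

-- B's suffix recursion is the fold, over all start positions, of the handshake steps keyed by
-- the from-scratch signatures pvKey.
theorem pv_outer (cs : List Char) :
    ∀ (u pref : List Char) (dt : PySem.Dict (List Int) Int × Int), cs = pref ++ u →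
      pvBLoop u dt
        = (PySem.List.pyRange (pref.length : Int) (cs.length : Int) 1).foldl
            (fun dt s =>
              (PySem.List.pyRange s (cs.length : Int) 1).foldl
                (fun dt e => pvH dt (pvKey cs s e)) dt) dt := by
  intro u
  induction u with
  | nil =>
    intro pref dt hl
    subst hl
    simp [pvBLoop, PySem.List.pyRange_one_eq_nil (le_refl _)]
  | cons c u' ih =>
    intro pref dt hl
    have hlen : (pref.length : Int) < (cs.length : Int) := by subst hl; simp
    rw [PySem.List.pyRange_one_cons (by omega)]
    simp only [List.foldl_cons]
    show pvBLoop (c :: u') dt = _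
    rw [pvBLoop]
    have hinner :
        (((c :: u').foldl (init := (List.replicate 26 (0 : Int), dt))
          (fun sd ch =>
            let sig :=
              PySem.List.pySetD sd.1 ((ch.toNat : Int) - 97)
                (PySem.List.pyGetD sd.1 ((ch.toNat : Int) - 97) 0 + 1)
            (sig, (sd.2.1.modify sig 0 (· + 1), sd.2.2 + sd.2.1.getD sig 0)))).2)
          = (PySem.List.pyRange (pref.length : Int) (cs.length : Int) 1).foldl
              (fun dt e => pvH dt (pvKey cs (pref.length : Int) e)) dt := by
      have hdrop : cs.drop pref.length = c :: u' := by
        rw [hl, List.drop_left]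
      have := pv_inner_aux pvF pvH (List.replicate 26 (0 : Int)) (pref.length : Int)
        (c :: u') (c :: u') [] dt rfl
      simp only [List.foldl_nil, List.length_nil, Nat.cast_zero, add_zero] at this
      have hlen2 : (pref.length : Int) + ((c :: u').length : Int) = (cs.length : Int) := by
        rw [hl]; simp
      rw [hlen2] at this
      have hkey : ∀ e : Int,
          ((c :: u').take (e + 1 - (pref.length : Int)).toNat).foldl pvF
              (List.replicate 26 (0 : Int))
            = pvKey cs (pref.length : Int) e := by
        intro e
        unfold pvKey
        rw [Int.toNat_natCast, hdrop]
      rw [show (fun dt e => pvH dt (pvKey cs (pref.length : Int) e))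
            = (fun dt e =>
                pvH dt (((c :: u').take (e + 1 - (pref.length : Int)).toNat).foldl pvF
                  (List.replicate 26 (0 : Int)))) from by
        funext dt' e; rw [hkey]]
      exact this
    rw [hinner]
    have harg : ((pref ++ [c]).length : Int) = (pref.length : Int) + 1 := by
      simp
    have := ih (pref ++ [c])
      ((PySem.List.pyRange (pref.length : Int) (cs.length : Int) 1).foldl
        (fun dt e => pvH dt (pvKey cs (pref.length : Int) e)) dt) (by simp [hl])
    rw [harg] at this
    exact this

theorem pv_A_eq (s : String) :
    count_anagram_substring_pairs s = pvS ((pvKeys s.toList).foldl pvM PySem.Dict.empty) := by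
  unfold count_anagram_substring_pairs
  simp only []
  set cs := s.toList with hcs
  have hdict :
      (PySem.List.pyRange 0 (cs.length : Int) 1).foldl (init := (PySem.Dict.empty : PySem.Dict (List Int) Int))
        (fun d start =>
          (PySem.List.pyRange start (cs.length : Int) 1).foldl (init := d) fun d e =>
            d.modify
              ((PySem.List.slice cs (some start) (some (e + 1))).foldl
                (init := List.replicate 26 (0 : Int))
                (fun sig c =>
                  PySem.List.pySetD sig ((c.toNat : Int) - 97)
                    (PySem.List.pyGetD sig ((c.toNat : Int) - 97) 0 + 1))) 0 (· + 1))
        = (pvKeys cs).foldl pvM PySem.Dict.empty := by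
    unfold pvKeys
    rw [List.foldl_flatMap]
    apply PySem.List.foldl_congr_mem
    intro d start hstart
    have hs := PySem.List.mem_pyRange_one.mp hstart
    rw [List.foldl_map]
    apply PySem.List.foldl_congr_mem
    intro d' e he
    have he' := PySem.List.mem_pyRange_one.mp he
    have h1 : (0 : Int) ≤ start := hs.1
    have h2 : (0 : Int) ≤ e + 1 := by omega
    rw [PySem.List.slice_toNat cs h1 h2]
    have h3 : (e + 1).toNat - start.toNat = (e + 1 - start).toNat := by omega
    rw [h3]
    rfl
  rw [hdict, PySem.List.foldl_add]
  unfold pvS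
  simp

theorem pv_B_eq (s : String) :
    count_anagram_substring_pairs_alt s
      = ((pvKeys s.toList).foldl pvH (PySem.Dict.empty, 0)).2 := by
  unfold count_anagram_substring_pairs_alt
  rw [pv_outer s.toList s.toList [] (PySem.Dict.empty, 0) rfl]
  unfold pvKeys
  rw [List.foldl_flatMap]
  congr 1
  apply PySem.List.foldl_congr_mem
  intro dt start _
  rw [List.foldl_map]

theorem count_anagram_substring_pairs_eq_alt (s : String) :
    count_anagram_substring_pairs s = count_anagram_substring_pairs_alt s := by
  rw [pv_A_eq, pv_B_eq]
  have := pv_handshake (pvKeys s.toList) PySem.Dict.empty 0 PySem.Dict.nodup_keys_empty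
  have hempty : pvS PySem.Dict.empty = 0 := rfl
  omega

-- ===== VERDICT (by name: the statement is the Claim_ definition above) =====
theorem count_anagram_substring_pairs_spec : Claim_equal_count_anagram_substring_pairs := by
  intro s _ _
  unfold Spec_count_anagram_substring_pairs
  exact count_anagram_substring_pairs_eq_alt s
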